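-- pv_equiv track=rewrite | github.com/jcolinpatrick/kryptos | scripts/e_nsa_02_missing_char.py | period_consistency
-- ===== SOURCE A (Python) =====
-- from collections import defaultdict
--
-- def period_consistency(kv, period):
--     groups = defaultdict(list)
--     for pos, k in kv.items():
--         groups[pos % period].append(k)
--     consistent = 0
--     for vals in groups.values():
--         counts = defaultdict(int)
--         for v in vals:
--             counts[v] += 1
--         consistent += max(counts.values())
--     return consistent
-- ===== SOURCE B (Python) =====
-- def period_consistency(kv, period):
--     # Sort-then-scan: order the (residue, value) pairs lexicographically, then
--     # make one linear pass over runs of equal pairs, keeping the longest run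
--     # per residue block and flushing it into the total when the residue changes.
--     pairs = sorted((pos % period, k) for pos, k in kv.items())
--     total = 0
--     best = 0   # longest run seen in the current residue block
--     run = 0    # length of the current run of identical pairs
--     prev = None
--     for p in pairs:
--         if p == prev:
--             run += 1
--         else:
--             best = max(best, run)
--             if prev is not None and p[0] != prev[0]:
--                 total += best
--                 best = 0
--             run = 1
--         prev = p
--     return total + max(best, run)
-- ===== Notes on version B (the rewrite author's own statement) =====
-- stated objective: alternative
-- what changed: A hash-groups values by residue and counts within each group; B sorts the (residue,value) pairs lexicographically and makes one linear scan over runs of equal pairs, keeping the longest run per residue block and flushing it when the residue changes -- no dictionaries or counters at all.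
import Mathlib
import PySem

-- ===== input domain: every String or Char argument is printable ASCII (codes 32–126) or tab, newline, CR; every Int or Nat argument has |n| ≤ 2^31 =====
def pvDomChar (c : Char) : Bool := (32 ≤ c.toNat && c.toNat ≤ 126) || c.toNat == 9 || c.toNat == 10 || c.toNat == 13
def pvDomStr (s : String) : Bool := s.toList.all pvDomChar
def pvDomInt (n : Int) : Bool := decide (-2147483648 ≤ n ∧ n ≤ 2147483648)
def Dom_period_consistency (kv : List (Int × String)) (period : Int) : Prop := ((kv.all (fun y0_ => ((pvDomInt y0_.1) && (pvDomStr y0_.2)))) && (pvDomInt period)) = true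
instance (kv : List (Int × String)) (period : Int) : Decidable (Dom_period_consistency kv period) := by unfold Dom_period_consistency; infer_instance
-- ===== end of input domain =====

-- B replaces A's hash-grouping + per-group counting by sort-then-scan: the
-- (residue, value) pairs are sorted lexicographically and a single linear pass
-- over runs of equal pairs keeps the longest run per residue block
-- (alternative algorithm; not faster).


-- ===== PORT A =====
-- literal port of A: group values by pos % period, then count within each
-- group and add the largest count.  max() is only ever applied to the values
-- of a counter over a NONEMPTY group, so the `.getD 0` default is unreachable.
def period_consistency (kv : List (Int × String)) (period : Int) : Int :=
  let groups : PySem.Dict Int (List String) :=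
    kv.foldl (fun d p => d.modify (PySem.Int.mod p.1 period) [] (· ++ [p.2])) PySem.Dict.empty
  groups.values.foldl
    (fun acc vals =>
      let counts : PySem.Dict String Int :=
        vals.foldl (fun d v => d.modify v 0 (· + 1)) PySem.Dict.empty
      acc + (PySem.List.max? counts.values (fun x => x)).getD 0) 0

-- ===== PORT B =====
-- literal port of B's loop body: state = (total, best, run, prev)
def pcStep (st : Int × Int × Int × Option (Int × String)) (p : Int × String) :
    Int × Int × Int × Option (Int × String) :=
  match st with
  | (total, best, run, prev) =>
    if prev = some p then (total, best, run + 1, prev)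
    else
      let best' := max best run
      match prev with
      | some q => if p.1 ≠ q.1 then (total + best', 0, 1, some p) else (total, best', 1, some p)
      | none => (total, best', 1, some p)

-- literal port of B: sort the (residue, value) pairs, then one scan over runs
def period_consistency_alt (kv : List (Int × String)) (period : Int) : Int :=
  let pairs := kv.map (fun p => (PySem.Int.mod p.1 period, p.2))
  let s := PySem.List.sorted2 pairs (fun p => p.1) (fun p => p.2)
  let st := s.foldl pcStep (0, 0, 0, none)
  st.1 + max st.2.1 st.2.2.1

-- ===== PRECONDITION & SPEC =====
-- Pre_ excludes exactly the inputs where Python A raises: period = 0 with a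
-- nonempty dict (ZeroDivisionError; with kv = {} the loop body never runs and
-- A returns 0).  The Nodup conjunct is only the dict representation
-- invariant: kv stands for a Python dict, whose keys are necessarily distinct.
def Pre_period_consistency (kv : List (Int × String)) (period : Int) : Prop :=
  (kv = [] ∨ period ≠ 0) ∧ (kv.map Prod.fst).Nodup
instance (kv : List (Int × String)) (period : Int) : Decidable (Pre_period_consistency kv period) := by unfold Pre_period_consistency; infer_instance
def pvWitness_period_consistency : (List (Int × String)) × Int := ([(0, "a"), (3, "a"), (4, "b")], 3)
def Spec_period_consistency (kv : List (Int × String)) (period : Int) (out : Int) : Prop := out = period_consistency_alt kv period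
instance (kv : List (Int × String)) (period : Int) (out : Int) : Decidable (Spec_period_consistency kv period out) := by unfold Spec_period_consistency; infer_instance

-- ===== CLAIM (what is proved, stated in full; the proofs are below) =====
def Claim_equal_period_consistency : Prop := ∀ (kv : List (Int × String)) (period : Int), Dom_period_consistency kv period → Pre_period_consistency kv period → Spec_period_consistency kv period (period_consistency kv period)


-- ===== LEMMAS AND PROOFS =====

-- best count within residue r: running max over the counts of the distinct pairs of residue r
def pvBestC (L : List (Int × String)) (r : Int) : Int :=
  ((PySem.Set.ofList L).filter (fun k => k.1 == r)).foldl (fun m k => max m (L.count k : Int)) 0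

-- the common mathematical value both programs compute
def pvGroupSum (L : List (Int × String)) : Int :=
  ((PySem.Set.ofList (L.map Prod.fst)).map (fun r => pvBestC L r)).sum

-- the comparison sorted2 sorts by (Python's tuple <)
def pvBefore (a b : Int × String) : Bool :=
  decide (a.1 < b.1) || (!decide (b.1 < a.1) && decide (a.2 < b.2))

-- summing loop: acc + g x over a list is init + sum of the mapped list
theorem pv_foldl_add_map {α : Type} (l : List α) (g : α → Int) (a : Int) :
    l.foldl (fun acc x => acc + g x) a = a + (l.map g).sum := by
  induction l generalizing a with
  | nil => simp
  | cons x t ih => simp [ih, add_assoc]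

-- counting a value inside one residue group = counting the pair globally
theorem pv_count_pair (L : List (Int × String)) (r : Int) (k : Int × String)
    (hk1 : k.1 = r) :
    (((L.filter (fun p => p.1 == r)).map (fun x => x.2)).count k.2) = L.count k := by
  rw [List.count_eq_countP, List.countP_map, List.countP_filter,
      List.count_eq_countP]
  refine List.countP_congr ?_
  intro p _
  have hbeq : (p == k) = (p.1 == k.1 && p.2 == k.2) := rfl
  simp [Function.comp, hbeq, hk1, and_comm]

-- A's max count inside the residue-r group equals pvBestC
theorem pv_pointwise (L : List (Int × String)) (r : Int)
    (hr : r ∈ (L.map Prod.fst)) :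
    (PySem.List.max?
        ((PySem.Dict.counter ((L.filter (fun p => p.1 == r)).map (fun x => x.2))).values)
        (fun x => x)).getD 0
      = pvBestC L r := by
  classical
  unfold pvBestC
  obtain ⟨p0, hp0L, hp0r⟩ := List.mem_map.mp hr
  have hp0f : p0 ∈ L.filter (fun p => p.1 == r) :=
    List.mem_filter.mpr ⟨hp0L, by simp [hp0r]⟩
  have hvalsne : (L.filter (fun p => p.1 == r)).map (fun x => x.2) ≠ [] := by
    intro h
    rw [List.map_eq_nil_iff] at h
    rw [h] at hp0f
    exact absurd hp0f (List.not_mem_nil)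
  have hcntvals :
      (PySem.Dict.counter ((L.filter (fun p => p.1 == r)).map (fun x => x.2))).values
        = (PySem.Set.ofList ((L.filter (fun p => p.1 == r)).map (fun x => x.2))).map
            (fun v => (((L.filter (fun p => p.1 == r)).map (fun x => x.2)).count v : Int)) := by
    simp only [PySem.Dict.values, PySem.Dict.items_counter, List.map_map]
    rfl
  have hSvne : PySem.Set.ofList ((L.filter (fun p => p.1 == r)).map (fun x => x.2)) ≠ [] := by
    obtain ⟨v, hv⟩ := List.exists_mem_of_ne_nil _ hvalsne
    intro h
    have := (PySem.Set.mem_ofList _ v).mpr hv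
    rw [h] at this
    exact absurd this (List.not_mem_nil)
  have hCAne :
      (PySem.Set.ofList ((L.filter (fun p => p.1 == r)).map (fun x => x.2))).map
          (fun v => (((L.filter (fun p => p.1 == r)).map (fun x => x.2)).count v : Int)) ≠ [] := by
    simpa [List.map_eq_nil_iff] using hSvne
  obtain ⟨x, t, hxt⟩ := List.exists_cons_of_ne_nil hCAne
  have hposCA : ∀ y ∈ (PySem.Set.ofList ((L.filter (fun p => p.1 == r)).map (fun x => x.2))).map
      (fun v => (((L.filter (fun p => p.1 == r)).map (fun x => x.2)).count v : Int)), (1:Int) ≤ y := by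
    intro y hy
    obtain ⟨v, hv, rfl⟩ := List.mem_map.mp hy
    have hvmem : v ∈ (L.filter (fun p => p.1 == r)).map (fun x => x.2) :=
      (PySem.Set.mem_ofList _ v).mp hv
    exact_mod_cast List.one_le_count_iff.mpr hvmem
  have hfA :
      (PySem.List.max?
          ((PySem.Dict.counter ((L.filter (fun p => p.1 == r)).map (fun x => x.2))).values)
          (fun x => x)).getD 0
        = ((PySem.Set.ofList ((L.filter (fun p => p.1 == r)).map (fun x => x.2))).map
            (fun v => (((L.filter (fun p => p.1 == r)).map (fun x => x.2)).count v : Int))).foldl max 0 := by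
    have hx1 : (1:Int) ≤ x := hposCA x (by rw [hxt]; exact List.mem_cons_self ..)
    rw [hcntvals, hxt, PySem.List.max?_id_cons]
    simp only [Option.getD_some, List.foldl_cons]
    rw [max_eq_right (by linarith)]
  rw [hfA]
  have hcnt : ∀ k ∈ (PySem.Set.ofList L).filter (fun k => k.1 == r),
      ((L.count k : Int)) = (((L.filter (fun p => p.1 == r)).map (fun x => x.2)).count k.2 : Int) := by
    intro k hk
    have hk' := List.mem_filter.mp hk
    have hk1 : k.1 = r := by simpa using hk'.2
    exact congrArg (fun n : Nat => (n : Int)) (pv_count_pair L r k hk1).symm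
  have hnodupS1 : ((PySem.Set.ofList L).filter (fun k => k.1 == r)).Nodup :=
    (PySem.Set.nodup_ofList L).filter _
  have hmapnodup : (((PySem.Set.ofList L).filter (fun k => k.1 == r)).map (fun k => k.2)).Nodup := by
    refine hnodupS1.map_on ?_
    intro a ha b hb hab
    have ha' : a.1 = r := by simpa using (List.mem_filter.mp ha).2
    have hb' : b.1 = r := by simpa using (List.mem_filter.mp hb).2
    exact Prod.ext (by rw [ha', hb']) hab
  have hperm2 : (((PySem.Set.ofList L).filter (fun k => k.1 == r)).map (fun k => k.2)).Perm
      (PySem.Set.ofList ((L.filter (fun p => p.1 == r)).map (fun x => x.2))) := by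
    rw [List.perm_ext_iff_of_nodup hmapnodup (PySem.Set.nodup_ofList _)]
    intro v
    simp only [List.mem_map, List.mem_filter, PySem.Set.mem_ofList, beq_iff_eq]
  refine Eq.symm ?_
  calc ((PySem.Set.ofList L).filter (fun k => k.1 == r)).foldl
          (fun m k => max m (L.count k : Int)) 0
      = (((PySem.Set.ofList L).filter (fun k => k.1 == r)).map
          (fun k => (L.count k : Int))).foldl max 0 := (List.foldl_map).symm
    _ = (((PySem.Set.ofList L).filter (fun k => k.1 == r)).map
          (fun k => (((L.filter (fun p => p.1 == r)).map (fun x => x.2)).count k.2 : Int))).foldl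
            max 0 := by rw [List.map_congr_left hcnt]
    _ = ((((PySem.Set.ofList L).filter (fun k => k.1 == r)).map (fun k => k.2)).map
          (fun v => (((L.filter (fun p => p.1 == r)).map (fun x => x.2)).count v : Int))).foldl
            max 0 := by rw [List.map_map]; rfl
    _ = ((PySem.Set.ofList ((L.filter (fun p => p.1 == r)).map (fun x => x.2))).map
          (fun v => (((L.filter (fun p => p.1 == r)).map (fun x => x.2)).count v : Int))).foldl
            max 0 := (hperm2.map _).foldl_eq 0

-- A computes pvGroupSum of the residue-tagged list
theorem pv_A_eq (kv : List (Int × String)) (period : Int) :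
    period_consistency kv period
      = pvGroupSum (kv.map (fun p => (PySem.Int.mod p.1 period, p.2))) := by
  classical
  obtain ⟨L, hL⟩ : ∃ L, kv.map (fun p => (PySem.Int.mod p.1 period, p.2)) = L := ⟨_, rfl⟩
  rw [hL]
  have hgroups :
      (kv.foldl (fun d p => d.modify (PySem.Int.mod p.1 period) [] (· ++ [p.2]))
        (PySem.Dict.empty : PySem.Dict Int (List String)))
      = L.foldl (fun d p => d.modify p.1 [] (· ++ [p.2])) PySem.Dict.empty := by
    rw [← hL, List.foldl_map]
  have hkeysA :
      (L.foldl (fun d p => d.modify p.1 [] (· ++ [p.2]))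
        (PySem.Dict.empty : PySem.Dict Int (List String))).keys
      = PySem.Set.ofList (L.map Prod.fst) := by
    rw [PySem.Dict.keys_foldl_modify_key L Prod.fst [] (fun d p v => v ++ [p.2]),
        PySem.Dict.keys_empty, PySem.Set.update_nil_left]
  have hnodupA :
      (L.foldl (fun d p => d.modify p.1 [] (· ++ [p.2]))
        (PySem.Dict.empty : PySem.Dict Int (List String))).keys.Nodup := by
    rw [hkeysA]; exact PySem.Set.nodup_ofList _
  have hgetD : ∀ r : Int,
      (L.foldl (fun d p => d.modify p.1 [] (· ++ [p.2]))
        (PySem.Dict.empty : PySem.Dict Int (List String))).getD r []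
      = (L.filter (fun p => p.1 == r)).map (fun x => x.2) := by
    intro r
    simpa [PySem.Dict.getD_empty] using PySem.Dict.getD_foldl_modify_append L PySem.Dict.empty r
  have hA : period_consistency kv period
      = 0 + ((PySem.Set.ofList (L.map Prod.fst)).map (fun r =>
          (PySem.List.max?
              ((PySem.Dict.counter ((L.filter (fun p => p.1 == r)).map (fun x => x.2))).values)
              (fun x => x)).getD 0)).sum := by
    simp only [period_consistency]
    rw [hgroups, PySem.Dict.values_eq_map_keys _ hnodupA [], hkeysA, List.foldl_map]
    simp only [← PySem.Dict.counter_eq_foldl, hgetD, pv_foldl_add_map]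
  rw [hA]
  have hcong : (PySem.Set.ofList (L.map Prod.fst)).map (fun r =>
          (PySem.List.max?
              ((PySem.Dict.counter ((L.filter (fun p => p.1 == r)).map (fun x => x.2))).values)
              (fun x => x)).getD 0)
      = (PySem.Set.ofList (L.map Prod.fst)).map (fun r => pvBestC L r) := by
    refine List.map_congr_left ?_
    intro r hr
    exact pv_pointwise L r ((PySem.Set.mem_ofList _ r).mp hr)
  rw [hcong, pvGroupSum]
  ring

-- ---- order facts about pvBefore ----
theorem pv_before_iff (a b : Int × String) :
    pvBefore a b = true ↔ (a.1 < b.1 ∨ (a.1 = b.1 ∧ a.2 < b.2)) := by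
  simp only [pvBefore, Bool.or_eq_true, Bool.and_eq_true, Bool.not_eq_eq_eq_not,
    Bool.not_true, decide_eq_true_eq, decide_eq_false_iff_not]
  constructor
  · rintro (h | ⟨h1, h2⟩)
    · exact Or.inl h
    · rcases lt_trichotomy a.1 b.1 with hlt | heq | hgt
      · exact Or.inl hlt
      · exact Or.inr ⟨heq, h2⟩
      · exact absurd hgt h1
  · rintro (h | ⟨h1, h2⟩)
    · exact Or.inl h
    · exact Or.inr ⟨by rw [h1]; exact lt_irrefl _, h2⟩

theorem pv_before_irrefl (a : Int × String) : pvBefore a a = false := by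
  rw [Bool.eq_false_iff]
  intro h
  rcases (pv_before_iff a a).mp h with hlt | ⟨_, hlt⟩ <;> exact lt_irrefl _ hlt

theorem pv_not_before_trans (a b c : Int × String)
    (h1 : pvBefore a b = false) (h2 : pvBefore b c = false) : pvBefore a c = false := by
  have H1 : ¬ (a.1 < b.1 ∨ (a.1 = b.1 ∧ a.2 < b.2)) := by
    rw [← pv_before_iff]; simp [h1]
  have H2 : ¬ (b.1 < c.1 ∨ (b.1 = c.1 ∧ b.2 < c.2)) := by
    rw [← pv_before_iff]; simp [h2]
  push Not at H1 H2
  rw [Bool.eq_false_iff]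
  intro h
  have hba : b.1 ≤ a.1 := H1.1
  have hcb : c.1 ≤ b.1 := H2.1
  rcases (pv_before_iff a c).mp h with hlt | ⟨he, hlt2⟩
  · exact absurd hlt (not_lt.mpr (le_trans hcb hba))
  · have hab : a.1 = b.1 := le_antisymm (he ▸ hcb) hba
    have hbc : b.1 = c.1 := hab ▸ he
    have hba2 : b.2 ≤ a.2 := (H1.2 hab)
    have hcb2 : c.2 ≤ b.2 := (H2.2 hbc)
    exact absurd hlt2 (not_lt.mpr (le_trans hcb2 hba2))

theorem pv_before_asymm (a b : Int × String) (h : pvBefore a b = true) :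
    pvBefore b a = false := by
  rw [Bool.eq_false_iff]
  intro hcon
  rcases (pv_before_iff a b).mp h with h1 | ⟨h1, h2⟩ <;>
    rcases (pv_before_iff b a).mp hcon with h3 | ⟨h3, h4⟩
  · exact lt_asymm h1 h3
  · exact absurd h1 (h3 ▸ lt_irrefl _)
  · exact absurd h3 (h1 ▸ lt_irrefl _)
  · exact lt_asymm h2 h4

theorem pv_before_of_ne (a b : Int × String) (h : pvBefore b a = false) (hne : a ≠ b) :
    pvBefore a b = true := by
  have H : ¬ (b.1 < a.1 ∨ (b.1 = a.1 ∧ b.2 < a.2)) := by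
    rw [← pv_before_iff]; simp [h]
  push Not at H
  rw [pv_before_iff]
  rcases lt_trichotomy a.1 b.1 with hlt | heq | hgt
  · exact Or.inl hlt
  · exact Or.inr ⟨heq, lt_of_le_of_ne ((H.2 heq.symm))
      (fun he => hne (Prod.ext heq he))⟩
  · exact absurd hgt (not_lt.mpr (H.1))

theorem pv_before_antisymm (a b : Int × String)
    (h1 : pvBefore a b = false) (h2 : pvBefore b a = false) : a = b := by
  by_contra hne
  exact absurd (pv_before_of_ne a b h2 hne) (Bool.eq_false_iff.mp h1)

-- insertBy keeps the list sorted for pvBefore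
theorem pv_insertBy_pairwise (x : Int × String) (ys : List (Int × String))
    (h : ys.Pairwise (fun a b => pvBefore b a = false)) :
    (PySem.List.insertBy pvBefore x ys).Pairwise (fun a b => pvBefore b a = false) := by
  induction ys with
  | nil => simp [PySem.List.insertBy]
  | cons y ys ih =>
    have hins : PySem.List.insertBy pvBefore x (y :: ys)
        = if pvBefore x y then x :: y :: ys else y :: PySem.List.insertBy pvBefore x ys := rfl
    rw [hins]
    rcases List.pairwise_cons.mp h with ⟨hy, hys⟩
    by_cases hxy : pvBefore x y = true
    · rw [if_pos hxy]
      refine List.pairwise_cons.mpr ⟨?_, h⟩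
      intro z hz
      rcases List.mem_cons.mp hz with rfl | hz2
      · exact pv_before_asymm x z hxy
      · exact pv_not_before_trans z y x (hy z hz2) (pv_before_asymm x y hxy)
    · rw [if_neg hxy]
      refine List.pairwise_cons.mpr ⟨?_, ih hys⟩
      intro z hz
      rcases (PySem.List.mem_insertBy pvBefore x z ys).mp hz with rfl | hz2
      · exact Bool.eq_false_iff.mpr hxy
      · exact hy z hz2

theorem pv_sorted2_pairwise (xs : List (Int × String)) :
    (PySem.List.sorted2 xs (fun p => p.1) (fun p => p.2)).Pairwise
      (fun a b => pvBefore b a = false) := by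
  have key : forall (l acc : List (Int × String)),
      acc.Pairwise (fun a b => pvBefore b a = false) →
      (l.foldl (fun acc x => PySem.List.insertBy pvBefore x acc) acc).Pairwise
        (fun a b => pvBefore b a = false) := by
    intro l
    induction l with
    | nil => intro acc h; exact h
    | cons x l ih =>
      intro acc h
      exact ih _ (pv_insertBy_pairwise x acc h)
  have he : PySem.List.sorted2 xs (fun p => p.1) (fun p => p.2)
      = xs.foldl (fun acc x => PySem.List.insertBy pvBefore x acc) [] := rfl
  rw [he]
  exact key xs [] List.Pairwise.nil

-- leading-run decomposition of a sorted list
theorem pv_run_decomp (V : List (Int × String)) (p : Int × String)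
    (hs : V.Pairwise (fun a b => pvBefore b a = false))
    (hge : ∀ x ∈ V, pvBefore x p = false) :
    V = List.replicate (V.count p) p ++ V.filter (fun x => x != p) := by
  induction V with
  | nil => simp
  | cons v V ih =>
    rcases List.pairwise_cons.mp hs with ⟨hv, hVs⟩
    by_cases hvp : v = p
    · subst hvp
      have hfil : (v :: V).filter (fun x => x != v) = V.filter (fun x => x != v) := by
        simp
      have hV : V = List.replicate (V.count v) v ++ V.filter (fun x => x != v) :=
        ih hVs (fun x hx => hge x (List.mem_cons_of_mem _ hx))
      rw [List.count_cons_self, List.replicate_succ, hfil]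
      exact congrArg (v :: ·) hV
    · have hnp : ∀ x ∈ v :: V, x ≠ p := by
        intro x hx hxp
        subst hxp
        rcases List.mem_cons.mp hx with heq | hx2
        · exact hvp heq.symm
        · exact hvp (pv_before_antisymm v x (hge v (List.mem_cons_self ..)) (hv x hx2))
      have hcnt : (v :: V).count p = 0 :=
        List.count_eq_zero.mpr (fun hmem => hnp p hmem rfl)
      have hfil : (v :: V).filter (fun x => x != p) = v :: V :=
        List.filter_eq_self.mpr (fun x hx => bne_iff_ne.mpr (hnp x hx))
      rw [hcnt, hfil]
      simp

-- folding a run of equal pairs just increments the run counter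
theorem pv_fold_replicate (n : Nat) (t b k : Int) (p : Int × String) :
    (List.replicate n p).foldl pcStep (t, b, k, some p) = (t, b, k + n, some p) := by
  induction n generalizing k with
  | zero => simp
  | succ n ih =>
    rw [List.replicate_succ, List.foldl_cons]
    have hstep : pcStep (t, b, k, some p) p = (t, b, k + 1, some p) := by
      simp [pcStep]
    rw [hstep, ih]
    have : k + 1 + (n : Int) = k + ((n : Nat) + 1 : Nat) := by push_cast; ring
    rw [this]

theorem pv_foldl_max_init (l : List Int) (a b : Int) :
    l.foldl max (max a b) = max a (l.foldl max b) := by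
  induction l generalizing b with
  | nil => simp
  | cons x l ih =>
    rw [List.foldl_cons, List.foldl_cons, max_assoc, ih]

theorem pv_foldl_max_perm (l₁ l₂ : List Int) (h : l₁.Perm l₂) (a : Int) :
    l₁.foldl max a = l₂.foldl max a := by
  induction h generalizing a with
  | nil => rfl
  | cons x h ih => rw [List.foldl_cons, List.foldl_cons, ih]
  | swap x y l =>
    rw [List.foldl_cons, List.foldl_cons, List.foldl_cons, List.foldl_cons,
        max_right_comm]
  | trans h1 h2 ih1 ih2 => rw [ih1, ih2]

-- pcStep evaluation lemmas
theorem pv_pcStep_none (t b k : Int) (p : Int × String) :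
    pcStep (t, b, k, none) p = (t, max b k, 1, some p) := by
  simp [pcStep]

theorem pv_pcStep_same_res (t b k : Int) (q p : Int × String) (hne : q ≠ p)
    (h : p.1 = q.1) : pcStep (t, b, k, some q) p = (t, max b k, 1, some p) := by
  simp [pcStep, hne, h]

theorem pv_pcStep_new_res (t b k : Int) (q p : Int × String) (h : p.1 ≠ q.1) :
    pcStep (t, b, k, some q) p = (t + max b k, 0, 1, some p) := by
  have hne : q ≠ p := fun he => h (he ▸ rfl)
  simp [pcStep, hne, h]

-- pvBestC in map-then-max form
theorem pv_bestC_eq_map (L : List (Int × String)) (r : Int) :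
    pvBestC L r = (((PySem.Set.ofList L).filter (fun k => k.1 == r)).map
      (fun k => (L.count k : Int))).foldl max 0 := by
  unfold pvBestC
  rw [List.foldl_map]

-- counting an element other than p is unchanged by dropping the p's
theorem pv_count_cons_filter (p : Int × String) (V : List (Int × String))
    (x : Int × String) (hx : x ≠ p) :
    (p :: V).count x = (V.filter (fun y => y != p)).count x := by
  have h1 : (p :: V).count x = V.count x := by
    simp [Ne.symm hx]
  rw [h1, List.count_filter (by simpa using hx)]

-- no element of residue r: the best count is 0
theorem pv_bestC_absent (L : List (Int × String)) (r : Int)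
    (h : ∀ x ∈ L, x.1 ≠ r) : pvBestC L r = 0 := by
  unfold pvBestC
  have hnil : (PySem.Set.ofList L).filter (fun k => k.1 == r) = [] :=
    List.filter_eq_nil_iff.mpr
      (fun x hx => by simpa using h x ((PySem.Set.mem_ofList L x).mp hx))
  rw [hnil]
  rfl

-- dropping the leading run does not change best counts of other residues
theorem pv_bestC_cons_ne (p : Int × String) (V : List (Int × String)) (r : Int)
    (hr : r ≠ p.1) :
    pvBestC (p :: V) r = pvBestC (V.filter (fun y => y != p)) r := by
  have hperm : ((PySem.Set.ofList (p :: V)).filter (fun k => k.1 == r)).Perm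
      ((PySem.Set.ofList (V.filter (fun y => y != p))).filter (fun k => k.1 == r)) := by
    rw [List.perm_ext_iff_of_nodup ((PySem.Set.nodup_ofList _).filter _)
        ((PySem.Set.nodup_ofList _).filter _)]
    intro x
    simp only [List.mem_filter, PySem.Set.mem_ofList, List.mem_cons, beq_iff_eq,
      bne_iff_ne]
    constructor
    · rintro ⟨hx | hx, hxr⟩
      · exact absurd (hx ▸ hxr) (Ne.symm hr)
      · exact ⟨⟨hx, fun he => (Ne.symm hr) (he ▸ hxr)⟩, hxr⟩
    · rintro ⟨⟨hx, _⟩, hxr⟩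
      exact ⟨Or.inr hx, hxr⟩
  rw [pv_bestC_eq_map, pv_bestC_eq_map]
  rw [pv_foldl_max_perm _ _ (hperm.map _) 0]
  congr 1
  refine List.map_congr_left ?_
  intro x hx
  rcases List.mem_filter.mp hx with ⟨hxm, hxr⟩
  have hxne : x ≠ p := by
    intro he
    exact (Ne.symm hr) (he ▸ (by simpa using hxr))
  rw [pv_count_cons_filter p V x hxne]

-- the best count of p's own residue joins the run of p with the rest
theorem pv_bestC_cons_self (p : Int × String) (V : List (Int × String)) :
    pvBestC (p :: V) p.1
      = max ((p :: V).count p : Int) (pvBestC (V.filter (fun y => y != p)) p.1) := by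
  have hpnot : p ∉ (PySem.Set.ofList (V.filter (fun y => y != p))).filter
      (fun k => k.1 == p.1) := by
    intro hmem
    rcases List.mem_filter.mp hmem with ⟨hm, _⟩
    rcases List.mem_filter.mp ((PySem.Set.mem_ofList _ p).mp hm) with ⟨_, hne⟩
    exact (bne_iff_ne.mp hne) rfl
  have hperm : ((PySem.Set.ofList (p :: V)).filter (fun k => k.1 == p.1)).Perm
      (p :: (PySem.Set.ofList (V.filter (fun y => y != p))).filter (fun k => k.1 == p.1)) := by
    rw [List.perm_ext_iff_of_nodup ((PySem.Set.nodup_ofList _).filter _)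
        (List.nodup_cons.mpr ⟨hpnot, (PySem.Set.nodup_ofList _).filter _⟩)]
    intro x
    simp only [List.mem_filter, PySem.Set.mem_ofList, List.mem_cons, beq_iff_eq,
      bne_iff_ne]
    constructor
    · rintro ⟨hx | hx, hxr⟩
      · exact Or.inl hx
      · by_cases hxp : x = p
        · exact Or.inl hxp
        · exact Or.inr ⟨⟨hx, hxp⟩, hxr⟩
    · rintro (rfl | ⟨⟨hx, _⟩, hxr⟩)
      · exact ⟨Or.inl rfl, rfl⟩
      · exact ⟨Or.inr hx, hxr⟩
  rw [pv_bestC_eq_map, pv_bestC_eq_map]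
  rw [pv_foldl_max_perm _ _ (hperm.map _) 0]
  rw [List.map_cons, List.foldl_cons]
  have hcongr : ((PySem.Set.ofList (V.filter (fun y => y != p))).filter
        (fun k => k.1 == p.1)).map (fun k => ((p :: V).count k : Int))
      = ((PySem.Set.ofList (V.filter (fun y => y != p))).filter
        (fun k => k.1 == p.1)).map (fun k => ((V.filter (fun y => y != p)).count k : Int)) := by
    refine List.map_congr_left ?_
    intro x hx
    have hxne : x ≠ p := by
      intro he
      exact hpnot (he ▸ hx)
    rw [pv_count_cons_filter p V x hxne]
  rw [hcongr, max_comm (0 : Int) _, pv_foldl_max_init]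

-- the residues other than p.1, as a list, survive dropping the leading run
theorem pv_resfilter_eq (p : Int × String) (V : List (Int × String)) :
    (PySem.Set.ofList ((p :: V).map Prod.fst)).filter (fun r => r != p.1)
      = (PySem.Set.discard (PySem.Set.ofList (V.map Prod.fst)) p.1) := by
  rw [List.map_cons, PySem.Set.ofList_cons, List.filter_cons]
  simp only [bne_self_eq_false, Bool.false_eq_true, ite_false]
  refine List.filter_eq_self.mpr ?_
  intro r hr
  exact bne_iff_ne.mpr ((PySem.Set.mem_discard _ _ _).mp hr).2

theorem pv_discard_perm (p : Int × String) (V : List (Int × String)) :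
    (PySem.Set.discard (PySem.Set.ofList (V.map Prod.fst)) p.1).Perm
      ((PySem.Set.ofList ((V.filter (fun y => y != p)).map Prod.fst)).filter
        (fun r => r != p.1)) := by
  rw [List.perm_ext_iff_of_nodup
      (PySem.Set.nodup_discard _ _ (PySem.Set.nodup_ofList _))
      ((PySem.Set.nodup_ofList _).filter _)]
  intro r
  simp only [PySem.Set.mem_discard, List.mem_filter, PySem.Set.mem_ofList,
    List.mem_map, bne_iff_ne]
  constructor
  · rintro ⟨⟨x, hx, rfl⟩, hne⟩
    exact ⟨⟨x, ⟨hx, fun he => hne (he ▸ rfl)⟩, rfl⟩, hne⟩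
  · rintro ⟨⟨x, ⟨hx, _⟩, rfl⟩, hne⟩
    exact ⟨⟨x, hx, rfl⟩, hne⟩

-- group-sum over the residues other than p.1
theorem pv_sum_ne (p : Int × String) (V : List (Int × String)) :
    (((PySem.Set.ofList ((p :: V).map Prod.fst)).filter (fun r => r != p.1)).map
        (fun r => pvBestC (p :: V) r)).sum
      = (((PySem.Set.ofList ((V.filter (fun y => y != p)).map Prod.fst)).filter
          (fun r => r != p.1)).map
            (fun r => pvBestC (V.filter (fun y => y != p)) r)).sum := by
  rw [pv_resfilter_eq]
  have hcongr : (PySem.Set.discard (PySem.Set.ofList (V.map Prod.fst)) p.1).map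
        (fun r => pvBestC (p :: V) r)
      = (PySem.Set.discard (PySem.Set.ofList (V.map Prod.fst)) p.1).map
        (fun r => pvBestC (V.filter (fun y => y != p)) r) := by
    refine List.map_congr_left ?_
    intro r hr
    exact pv_bestC_cons_ne p V r ((PySem.Set.mem_discard _ _ _).mp hr).2
  rw [hcongr]
  exact ((pv_discard_perm p V).map _).sum_eq

-- splitting the full group-sum at the leading run
theorem pv_sum_all (p : Int × String) (V : List (Int × String)) :
    ((PySem.Set.ofList ((p :: V).map Prod.fst)).map (fun r => pvBestC (p :: V) r)).sum
      = max ((p :: V).count p : Int) (pvBestC (V.filter (fun y => y != p)) p.1)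
        + (((PySem.Set.ofList ((V.filter (fun y => y != p)).map Prod.fst)).filter
            (fun r => r != p.1)).map
              (fun r => pvBestC (V.filter (fun y => y != p)) r)).sum := by
  have hsplit : PySem.Set.ofList ((p :: V).map Prod.fst)
      = p.1 :: PySem.Set.discard (PySem.Set.ofList (V.map Prod.fst)) p.1 := by
    rw [List.map_cons, PySem.Set.ofList_cons]
  rw [hsplit, List.map_cons, List.sum_cons, pv_bestC_cons_self]
  congr 1
  rw [← pv_resfilter_eq]
  exact pv_sum_ne p V

-- the scan over a sorted tail, with pending state, computes the group sums
theorem pv_scan (n : Nat) (U : List (Int × String)) (hn : U.length ≤ n)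
    (hs : U.Pairwise (fun a b => pvBefore b a = false))
    (q : Int × String) (t b k : Int)
    (hq : ∀ x ∈ U, pvBefore q x = true) (hb : 0 ≤ b) (hk : 0 ≤ k) :
    (U.foldl pcStep (t, b, k, some q)).1
        + max (U.foldl pcStep (t, b, k, some q)).2.1
              (U.foldl pcStep (t, b, k, some q)).2.2.1
      = t + max (max b k) (pvBestC U q.1)
          + (((PySem.Set.ofList (U.map Prod.fst)).filter (fun r => r != q.1)).map
              (fun r => pvBestC U r)).sum := by
  induction n generalizing U q t b k with
  | zero =>
    have hU : U = [] := List.length_eq_zero_iff.mp (Nat.le_zero.mp hn)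
    subst hU
    have habs : pvBestC ([] : List (Int × String)) q.1 = 0 := rfl
    simp only [List.foldl_nil]
    show t + max b k = t + max (max b k) (pvBestC ([] : List (Int × String)) q.1)
        + (((PySem.Set.ofList (([] : List (Int × String)).map Prod.fst)).filter
            (fun r => r != q.1)).map (fun r => pvBestC [] r)).sum
    rw [habs]
    show t + max b k = t + max (max b k) 0 + 0
    omega
  | succ n ih =>
    cases U with
    | nil =>
      have habs : pvBestC ([] : List (Int × String)) q.1 = 0 := rfl
      simp only [List.foldl_nil]
      show t + max b k = t + max (max b k) (pvBestC ([] : List (Int × String)) q.1)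
          + (((PySem.Set.ofList (([] : List (Int × String)).map Prod.fst)).filter
              (fun r => r != q.1)).map (fun r => pvBestC [] r)).sum
      rw [habs]
      show t + max b k = t + max (max b k) 0 + 0
      omega
    | cons p V =>
      rcases List.pairwise_cons.mp hs with ⟨hgeV, hsV⟩
      have hdec := pv_run_decomp V p hsV hgeV
      have hqp : q ≠ p := by
        intro he
        have hqpt := hq p (List.mem_cons_self ..)
        rw [he, pv_before_irrefl] at hqpt
        exact Bool.false_ne_true hqpt
      have hVlen : V.length ≤ n := by simpa using hn
      have hlen : (V.filter (fun y => y != p)).length ≤ n :=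
        le_trans (List.length_filter_le _ _) hVlen
      have hsU2 : (V.filter (fun y => y != p)).Pairwise
          (fun a b => pvBefore b a = false) := hsV.filter _
      have hqU2 : ∀ x ∈ V.filter (fun y => y != p), pvBefore p x = true := by
        intro x hx
        rcases List.mem_filter.mp hx with ⟨hxV, hxp⟩
        exact pv_before_of_ne p x (hgeV x hxV) (Ne.symm (bne_iff_ne.mp hxp))
      have hc : (1 : Int) + (V.count p : Int) = ((p :: V).count p : Int) := by
        rw [List.count_cons_self]
        push_cast
        ring
      have hfold : ∀ st1 : Int × Int × Int × Option (Int × String),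
          (p :: V).foldl pcStep st1
            = (V.filter (fun y => y != p)).foldl pcStep
                ((List.replicate (V.count p) p).foldl pcStep (pcStep st1 p)) := by
        intro st1
        rw [List.foldl_cons]
        conv_lhs => rw [hdec]
        rw [List.foldl_append]
      by_cases hcase : p.1 = q.1
      · rw [hfold, pv_pcStep_same_res t b k q p hqp hcase, pv_fold_replicate,
           ih (V.filter (fun y => y != p)) hlen hsU2 p t (max b k)
             (1 + (V.count p : Int)) hqU2 (le_max_of_le_right hk) (by omega)]
        rw [← hcase, pv_bestC_cons_self p V, pv_sum_ne p V, ← hc]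
        omega
      · rw [hfold, pv_pcStep_new_res t b k q p hcase, pv_fold_replicate,
           ih (V.filter (fun y => y != p)) hlen hsU2 p (t + max b k) 0
             (1 + (V.count p : Int)) hqU2 le_rfl (by omega)]
        have hq1p : q.1 < p.1 := by
          rcases (pv_before_iff q p).mp (hq p (List.mem_cons_self ..)) with hlt | ⟨he, _⟩
          · exact hlt
          · exact absurd he.symm hcase
        have hstrict : ∀ x ∈ p :: V, x.1 ≠ q.1 := by
          intro x hx
          rcases List.mem_cons.mp hx with rfl | hxV
          · exact fun he => hcase he
          · have H : ¬ (x.1 < p.1 ∨ (x.1 = p.1 ∧ x.2 < p.2)) := by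
              rw [← pv_before_iff]; simp [hgeV x hxV]
            push Not at H
            intro he
            exact absurd hq1p (not_lt.mpr (he ▸ H.1))
        have hfil : (PySem.Set.ofList ((p :: V).map Prod.fst)).filter (fun r => r != q.1)
            = PySem.Set.ofList ((p :: V).map Prod.fst) := by
          refine List.filter_eq_self.mpr ?_
          intro r hr
          rcases List.mem_map.mp ((PySem.Set.mem_ofList _ r).mp hr) with ⟨x, hx, rfl⟩
          exact bne_iff_ne.mpr (hstrict x hx)
        rw [pv_bestC_absent _ _ hstrict, hfil, pv_sum_all p V, ← hc]
        omega

-- the whole scan computes pvGroupSum on a sorted list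
theorem pv_scan_top (S : List (Int × String))
    (hs : S.Pairwise (fun a b => pvBefore b a = false)) :
    (S.foldl pcStep (0, 0, 0, none)).1
        + max (S.foldl pcStep (0, 0, 0, none)).2.1 (S.foldl pcStep (0, 0, 0, none)).2.2.1
      = pvGroupSum S := by
  cases S with
  | nil => norm_num [pvGroupSum]
  | cons p V =>
    rcases List.pairwise_cons.mp hs with ⟨hgeV, hsV⟩
    have hdec := pv_run_decomp V p hsV hgeV
    have hsU2 : (V.filter (fun y => y != p)).Pairwise
        (fun a b => pvBefore b a = false) := hsV.filter _
    have hqU2 : ∀ x ∈ V.filter (fun y => y != p), pvBefore p x = true := by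
      intro x hx
      rcases List.mem_filter.mp hx with ⟨hxV, hxp⟩
      exact pv_before_of_ne p x (hgeV x hxV) (Ne.symm (bne_iff_ne.mp hxp))
    have hc : (1 : Int) + (V.count p : Int) = ((p :: V).count p : Int) := by
      rw [List.count_cons_self]
      push_cast
      ring
    have hstep : pcStep (0, 0, 0, none) p = (0, 0, 1, some p) := by
      rw [pv_pcStep_none]
      norm_num
    have hfold : (p :: V).foldl pcStep (0, 0, 0, none)
        = (V.filter (fun y => y != p)).foldl pcStep
            ((List.replicate (V.count p) p).foldl pcStep (0, 0, 1, some p)) := by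
      rw [List.foldl_cons, hstep]
      conv_lhs => rw [hdec]
      rw [List.foldl_append]
    rw [hfold, pv_fold_replicate,
        pv_scan (V.filter (fun y => y != p)).length (V.filter (fun y => y != p)) le_rfl
          hsU2 p 0 0 (1 + (V.count p : Int)) hqU2 le_rfl (by omega)]
    unfold pvGroupSum
    rw [pv_sum_all p V, ← hc]
    omega

-- pvGroupSum only depends on the multiset of pairs
theorem pv_groupSum_perm (S P : List (Int × String)) (h : S.Perm P) :
    pvGroupSum S = pvGroupSum P := by
  have hof : (PySem.Set.ofList S).Perm (PySem.Set.ofList P) := by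
    rw [List.perm_ext_iff_of_nodup (PySem.Set.nodup_ofList _) (PySem.Set.nodup_ofList _)]
    intro x
    rw [PySem.Set.mem_ofList, PySem.Set.mem_ofList]
    exact h.mem_iff
  have hcnt : (fun k => (S.count k : Int)) = (fun k => (P.count k : Int)) :=
    funext (fun k => congrArg _ (h.count_eq k))
  have hbest : (fun r => pvBestC S r) = (fun r => pvBestC P r) := by
    funext r
    rw [pv_bestC_eq_map, pv_bestC_eq_map, hcnt,
        pv_foldl_max_perm _ _ (((hof.filter _)).map _) 0]
  have hres : (PySem.Set.ofList (S.map Prod.fst)).Perm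
      (PySem.Set.ofList (P.map Prod.fst)) := by
    rw [List.perm_ext_iff_of_nodup (PySem.Set.nodup_ofList _) (PySem.Set.nodup_ofList _)]
    intro x
    rw [PySem.Set.mem_ofList, PySem.Set.mem_ofList]
    exact (h.map _).mem_iff
  unfold pvGroupSum
  rw [hbest]
  exact (hres.map _).sum_eq

theorem pv_main (kv : List (Int × String)) (period : Int) :
    period_consistency kv period = period_consistency_alt kv period := by
  have hB : period_consistency_alt kv period
      = pvGroupSum (PySem.List.sorted2 (kv.map (fun p => (PySem.Int.mod p.1 period, p.2)))
          (fun p => p.1) (fun p => p.2)) := by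
    unfold period_consistency_alt
    exact pv_scan_top _ (pv_sorted2_pairwise _)
  rw [pv_A_eq, hB,
      pv_groupSum_perm _ _ (PySem.List.sorted2_perm _ _ _ false)]

-- ===== VERDICT (by name: the statement is the Claim_ definition above) =====
theorem period_consistency_spec : Claim_equal_period_consistency := by
  intro kv period _ _
  show period_consistency kv period = period_consistency_alt kv period
  exact pv_main kv period
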